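-- pv_equiv track=rewrite | github.com/Dizzers/MIDI-Generation-Plugin | DIPLOM SPACE/model/generate.py | get_banned_next_tokens
-- ===== SOURCE A (Python) =====
-- def get_banned_next_tokens(generated, no_repeat_ngram_size):
--     n = no_repeat_ngram_size
--     if n <= 1 or len(generated) < n - 1:
--         return set()
--
--     prefix = tuple(generated[-(n - 1):])
--     banned = set()
--     for i in range(len(generated) - n + 1):
--         if tuple(generated[i:i + n - 1]) == prefix:
--             banned.add(generated[i + n - 1])
--     return banned
-- ===== SOURCE B (Python) =====
-- def get_banned_next_tokens(generated, no_repeat_ngram_size):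
--     n = no_repeat_ngram_size
--     if n <= 1 or len(generated) < n - 1:
--         return set()
--     k = n - 1
--     prefix = generated[-k:]
--     banned = set()
--     rest = generated
--     while len(rest) > k:
--         if rest[:k] == prefix:
--             banned.add(rest[k])
--         rest = rest[1:]
--     return banned
-- ===== Notes on version B (the rewrite author's own statement) =====
-- stated objective: alternative
-- what changed: B replaces A's index loop over range(len-n+1) comparing tuple slices against the fixed prefix by a structural sliding-window walk over shrinking suffixes: it repeatedly checks rest[:k] == prefix, records rest[k], and advances with rest = rest[1:], with no indices at all.
import Mathlib
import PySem

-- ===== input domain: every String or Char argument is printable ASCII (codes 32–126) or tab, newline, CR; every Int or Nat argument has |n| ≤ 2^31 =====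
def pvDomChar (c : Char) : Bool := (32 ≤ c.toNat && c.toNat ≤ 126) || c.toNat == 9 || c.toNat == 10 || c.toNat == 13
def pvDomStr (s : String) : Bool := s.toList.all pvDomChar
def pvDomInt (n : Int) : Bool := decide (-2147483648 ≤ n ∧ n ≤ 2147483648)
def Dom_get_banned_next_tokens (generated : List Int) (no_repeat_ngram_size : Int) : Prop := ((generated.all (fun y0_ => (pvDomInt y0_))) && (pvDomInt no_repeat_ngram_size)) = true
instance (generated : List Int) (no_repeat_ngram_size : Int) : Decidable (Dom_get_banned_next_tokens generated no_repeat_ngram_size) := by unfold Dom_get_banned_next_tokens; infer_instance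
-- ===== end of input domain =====

-- B replaces A's index loop (range + slice-vs-prefix comparison) by a structural
-- sliding-window recursion over shrinking suffixes (alternative decomposition; same result).

-- ===== PORT A =====
def get_banned_next_tokens (generated : List Int) (no_repeat_ngram_size : Int) : List Int :=
  let n := no_repeat_ngram_size
  if n ≤ 1 ∨ (generated.length : Int) < n - 1 then []
  else
    let pfx := PySem.List.slice generated (some (-(n - 1))) none
    (PySem.List.pyRange 0 ((generated.length : Int) - n + 1) 1).foldl
      (fun banned i =>
        if PySem.List.slice generated (some i) (some (i + n - 1)) = pfx then
          PySem.Set.add banned (PySem.List.pyGetD generated (i + n - 1) 0)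
        else banned)
      PySem.Set.empty

-- ===== PORT B =====
-- 'while len(rest) > k: … rest = rest[1:]' as structural recursion on the suffix.
def bannedGo (k : Nat) (pfx : List Int) : List Int → PySem.Set Int → PySem.Set Int
  | [], banned => banned
  | x :: t, banned =>
    if k < (x :: t).length then
      bannedGo k pfx t
        (if (x :: t).take k = pfx then
           PySem.Set.add banned (PySem.List.pyGetD (x :: t) (k : Int) 0)
         else banned)
    else banned

def get_banned_next_tokens_alt (generated : List Int) (no_repeat_ngram_size : Int) : List Int :=
  let n := no_repeat_ngram_size
  if n ≤ 1 ∨ (generated.length : Int) < n - 1 then []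
  else
    let k := (n - 1).toNat
    let pfx := generated.drop (generated.length - k)   -- generated[-k:], k ≥ 1 here
    bannedGo k pfx generated PySem.Set.empty

-- ===== PRECONDITION & SPEC =====
def Spec_get_banned_next_tokens (generated : List Int) (no_repeat_ngram_size : Int) (out : List Int) : Prop := out = get_banned_next_tokens_alt generated no_repeat_ngram_size
instance (generated : List Int) (no_repeat_ngram_size : Int) (out : List Int) : Decidable (Spec_get_banned_next_tokens generated no_repeat_ngram_size out) := by unfold Spec_get_banned_next_tokens; infer_instance

-- ===== CLAIM =====
def Claim_equal_get_banned_next_tokens : Prop := ∀ (generated : List Int) (no_repeat_ngram_size : Int), Dom_get_banned_next_tokens generated no_repeat_ngram_size → Spec_get_banned_next_tokens generated no_repeat_ngram_size (get_banned_next_tokens generated no_repeat_ngram_size)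

-- ===== LEMMAS AND PROOFS =====

-- A's index loop, re-indexed over List.range in pure Nat form, equals B's suffix recursion.
theorem range_foldl_eq_bannedGo (k : Nat) (pfx : List Int) :
    ∀ (l : List Int) (s : PySem.Set Int),
      (List.range (l.length - k)).foldl
        (fun s j =>
          if (l.drop j).take k = pfx then PySem.Set.add s (l.getD (j + k) 0) else s) s
      = bannedGo k pfx l s := by
  intro l
  induction l with
  | nil => intro s; simp [bannedGo]
  | cons x t ih =>
      intro s
      by_cases h : k < (x :: t).length
      · have hlen : (x :: t).length - k = (t.length - k) + 1 := by
          simp at h ⊢; omega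
        rw [hlen, List.range_succ_eq_map, List.foldl_cons, List.foldl_map]
        rw [bannedGo, if_pos h]
        rw [← ih]
        congr 1
        · funext s' j
          simp [Nat.succ_add]
        · simp [PySem.List.pyGetD_natCast]
      · have hlen : (x :: t).length - k = 0 := by simp at h ⊢; omega
        rw [hlen, bannedGo, if_neg h]
        rfl

-- ===== VERDICT =====
theorem get_banned_next_tokens_spec : Claim_equal_get_banned_next_tokens := by
  intro l n _
  unfold Spec_get_banned_next_tokens get_banned_next_tokens get_banned_next_tokens_alt
  by_cases h : n ≤ 1 ∨ (l.length : Int) < n - 1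
  · simp [h]
  · simp only [h, if_false]
    rw [not_or, not_le, not_lt] at h
    obtain ⟨h1, h2⟩ := h
    set k : Nat := (n - 1).toNat with hk
    have hnk : n - 1 = (k : Int) := by omega
    have hpfx : PySem.List.slice l (some (-(n - 1))) none = l.drop (l.length - k) := by
      rw [hnk]
      exact PySem.List.slice_from_neg_natCast l k (by omega)
    have hm : ((l.length : Int) - n + 1 - 0).toNat = l.length - k := by omega
    rw [hpfx, PySem.List.pyRange_one, List.foldl_map, hm]
    rw [← range_foldl_eq_bannedGo k (l.drop (l.length - k)) l PySem.Set.empty]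
    apply PySem.List.foldl_congr_mem
    intro s j _
    have e1 : (0 : Int) + (j : Int) = ((j : Nat) : Int) := by simp
    have e2 : (j : Int) + n - 1 = (((j + k : Nat)) : Int) := by push_cast; omega
    rw [e1, e2, PySem.List.slice_natCast, PySem.List.pyGetD_natCast,
        Nat.add_sub_cancel_left]
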